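/- GENERATED by farm/mkstatement.py from design/units.tsv (unit `DGifGetCodeNext.E`) and the assertions of Gif/Spec/Seg_DGifGetCodeNext.lean — do not edit.
   THE STATEMENT of the proof unit `DGifGetCodeNext.E`: segment E of `DGifGetCodeNext` (10 instructions; entries 0x109fc6;
   exits ret; ranges 0x109fc6-0x109fe3)
   takes each of its entry assertions to one of its exit assertions (`Gif.Spec.DGifGetCodeNext.SegE`), given the contracts of its callees.
   What the names mean: ProgX/Base/Spec/Basic.lean (the shared hypotheses), Gif/Spec/Seg_DGifGetCodeNext.lean (the assertions). The theorem to prove: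
   `theorem DGifGetCodeNext_E_ok : Gif.Spec.DGifGetCodeNext_E.Statement`. -/
import Gif.Code
import Gif.Dec.All
import Gif.Labels
import Gif.Spec.Seg_DGifGetCodeNext
namespace Gif.Spec.DGifGetCodeNext_E
open X86 X86.User Asan

/-- The statement of unit `DGifGetCodeNext.E`. -/
def Statement : Prop :=
  ∀ (Lay : Layout) (_hLay : Lay.hi = 0x1000000) (μ : Microarch) (_hμ : UserX.MicroOK μ) (u₀ : State)
    (_hcode : HasCodeNat Lay u₀ Gif.L.DGifGetCodeNext.entry Gif.Code.code_DGifGetCodeNext.nat Gif.L.DGifGetCodeNext.size),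
    Gif.Spec.DGifGetCodeNext.SegE Lay μ u₀

end Gif.Spec.DGifGetCodeNext_E
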